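-- pv_equiv track=rewrite | github.com/ajinrane/cadence | train_model.py | transformed_to_base_feature
-- ===== SOURCE A (Python) =====
-- def transformed_to_base_feature(name: str, categorical_cols: list[str]) -> str:
--     if name.startswith("num__"):
--         return name[len("num__") :]
--     if name.startswith("cat__"):
--         encoded = name[len("cat__") :]
--         for col in sorted(categorical_cols, key=len, reverse=True):
--             prefix = f"{col}_"
--             if encoded.startswith(prefix):
--                 return col
--         return encoded
--     return name
-- ===== SOURCE B (Python) =====
-- def transformed_to_base_feature(name: str, categorical_cols: list[str]) -> str:
--     if name.startswith("num__"):
--         return name[len("num__"):]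
--     if name.startswith("cat__"):
--         encoded = name[len("cat__"):]
--         best = None
--         best_len = -1
--         for col in categorical_cols:
--             if len(col) > best_len and encoded.startswith(col + "_"):
--                 best = col
--                 best_len = len(col)
--         return best if best is not None else encoded
--     return name
-- ===== Notes on version B (the rewrite author's own statement) =====
-- stated objective: simpler
-- what changed: The sorted(key=len, reverse=True) pass followed by a first-match scan is replaced by a single linear max-tracking scan over categorical_cols that keeps the longest matching column; no sort is performed.
import Mathlib
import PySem

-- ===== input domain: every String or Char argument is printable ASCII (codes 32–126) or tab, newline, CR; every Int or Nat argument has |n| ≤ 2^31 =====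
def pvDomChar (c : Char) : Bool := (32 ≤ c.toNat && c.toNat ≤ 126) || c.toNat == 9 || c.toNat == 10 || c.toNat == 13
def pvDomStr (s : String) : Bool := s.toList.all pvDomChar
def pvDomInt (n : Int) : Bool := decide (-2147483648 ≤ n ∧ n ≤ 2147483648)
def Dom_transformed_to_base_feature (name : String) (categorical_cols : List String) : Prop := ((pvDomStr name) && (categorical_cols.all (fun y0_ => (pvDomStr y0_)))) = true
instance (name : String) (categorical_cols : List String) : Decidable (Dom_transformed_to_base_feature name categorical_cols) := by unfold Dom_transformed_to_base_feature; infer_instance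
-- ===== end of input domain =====

-- B replaces A's sort-by-length-then-first-match scan with one linear max-tracking pass; return values are identical.

-- ===== PORT A =====
def transformed_to_base_feature (name : String) (categorical_cols : List String) : String :=
  if PySem.Str.startswith name "num__" then
    PySem.Str.slice name (some 5) none
  else if PySem.Str.startswith name "cat__" then
    let encoded := PySem.Str.slice name (some 5) none
    match (PySem.List.sorted categorical_cols PySem.Str.len true).find?
        (fun col => PySem.Str.startswith encoded (col ++ "_")) with
    | some col => col
    | none => encoded
  else name

-- ===== PORT B =====
def tbfAltLoop (encoded : String) (cols : List String) (best : Option String) (bestLen : Int) : Option String × Int :=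
  match cols with
  | [] => (best, bestLen)
  | col :: rest =>
    if bestLen < PySem.Str.len col ∧ PySem.Str.startswith encoded (col ++ "_") = true then
      tbfAltLoop encoded rest (some col) (PySem.Str.len col)
    else
      tbfAltLoop encoded rest best bestLen

def transformed_to_base_feature_alt (name : String) (categorical_cols : List String) : String :=
  if PySem.Str.startswith name "num__" then
    PySem.Str.slice name (some 5) none
  else if PySem.Str.startswith name "cat__" then
    let encoded := PySem.Str.slice name (some 5) none
    match (tbfAltLoop encoded categorical_cols none (-1)).1 with
    | some b => b
    | none => encoded
  else name

-- ===== PRECONDITION & SPEC =====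
def Spec_transformed_to_base_feature (name : String) (categorical_cols : List String) (out : String) : Prop := out = transformed_to_base_feature_alt name categorical_cols
instance (name : String) (categorical_cols : List String) (out : String) : Decidable (Spec_transformed_to_base_feature name categorical_cols out) := by unfold Spec_transformed_to_base_feature; infer_instance

-- ===== CLAIM (what is proved, stated in full; the proofs are below) =====
def Claim_equal_transformed_to_base_feature : Prop := ∀ (name : String) (categorical_cols : List String), Dom_transformed_to_base_feature name categorical_cols → Spec_transformed_to_base_feature name categorical_cols (transformed_to_base_feature name categorical_cols)

-- ===== LEMMAS AND PROOFS =====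

-- two columns that both match (col ++ "_" is a prefix of e) and have equal length are equal
lemma tbf_match_unique (e c1 c2 : String)
    (h1 : PySem.Str.startswith e (c1 ++ "_") = true)
    (h2 : PySem.Str.startswith e (c2 ++ "_") = true)
    (hl : PySem.Str.len c1 = PySem.Str.len c2) : c1 = c2 := by
  simp only [PySem.Str.startswith_eq, PySem.Chars.startswith_iff, String.toList_append] at h1 h2
  simp only [PySem.Str.len_eq, Nat.cast_inj] at hl
  have hlen : (c1.toList ++ "_".toList).length = (c2.toList ++ "_".toList).length := by
    simp [hl]
  have := (List.prefix_of_prefix_length_le h1 h2 (le_of_eq hlen)).eq_of_length hlen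
  have : c1.toList = c2.toList := List.append_cancel_right this
  exact String.toList_inj.mp this

-- the first match in a length-descending list has maximal length among all matches
lemma tbf_find_max (e : String) : ∀ (l : List String),
    l.Pairwise (fun a b => PySem.Str.len b ≤ PySem.Str.len a) →
    ∀ {m : String}, l.find? (fun c => PySem.Str.startswith e (c ++ "_")) = some m →
    PySem.Str.startswith e (m ++ "_") = true ∧ m ∈ l ∧
      ∀ y ∈ l, PySem.Str.startswith e (y ++ "_") = true → PySem.Str.len y ≤ PySem.Str.len m := by
  intro l hp m hf
  induction l with
  | nil => simp at hf
  | cons col rest ih =>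
    cases hc : PySem.Str.startswith e (col ++ "_") with
    | true =>
      rw [List.find?_cons_of_pos (by exact hc)] at hf
      injection hf with hf
      subst hf
      refine ⟨hc, List.mem_cons_self, ?_⟩
      intro y hy _
      rcases List.mem_cons.mp hy with h | h
      · subst h; exact le_refl _
      · exact (List.pairwise_cons.mp hp).1 y h
    | false =>
      rw [List.find?_cons_of_neg (by simp only [Bool.not_eq_true]; exact hc)] at hf
      obtain ⟨h1, h2, h3⟩ := ih (List.pairwise_cons.mp hp).2 hf
      refine ⟨h1, List.mem_cons_of_mem _ h2, ?_⟩
      intro y hy hys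
      rcases List.mem_cons.mp hy with h | h
      · subst h; rw [hc] at hys; exact absurd hys (by simp)
      · exact h3 y h hys

-- invariant-based characterisation of B's max-tracking loop
lemma tbfAltLoop_spec (e : String) : ∀ (l : List String) (best : Option String) (bestLen : Int),
    ((best = none ∧ bestLen = -1) ∨
      ∃ b, best = some b ∧ PySem.Str.startswith e (b ++ "_") = true ∧ bestLen = PySem.Str.len b) →
    bestLen ≤ (tbfAltLoop e l best bestLen).2 ∧
    (match (tbfAltLoop e l best bestLen).1 with
     | some b => PySem.Str.startswith e (b ++ "_") = true ∧ (b ∈ l ∨ best = some b) ∧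
         PySem.Str.len b = (tbfAltLoop e l best bestLen).2 ∧
         ∀ y ∈ l, PySem.Str.startswith e (y ++ "_") = true →
           PySem.Str.len y ≤ (tbfAltLoop e l best bestLen).2
     | none => best = none ∧ ∀ y ∈ l, PySem.Str.startswith e (y ++ "_") = false) := by
  intro l
  induction l with
  | nil =>
    intro best bestLen hinv
    simp only [tbfAltLoop]
    rcases hinv with ⟨hb, hl⟩ | ⟨b, hb, hp, hl⟩
    · subst hb; exact ⟨le_refl _, rfl, by simp⟩
    · subst hb; subst hl; exact ⟨le_refl _, hp, Or.inr rfl, rfl, by simp⟩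
  | cons col rest ih =>
    intro best bestLen hinv
    simp only [tbfAltLoop]
    by_cases hc : bestLen < PySem.Str.len col ∧ PySem.Str.startswith e (col ++ "_") = true
    · simp only [hc, if_pos, and_self]
      have hinv' : (((some col : Option String) = none ∧ PySem.Str.len col = -1) ∨
          ∃ b, (some col : Option String) = some b ∧ PySem.Str.startswith e (b ++ "_") = true ∧ PySem.Str.len col = PySem.Str.len b) :=
        Or.inr ⟨col, rfl, hc.2, rfl⟩
      obtain ⟨hle, hm⟩ := ih (some col) (PySem.Str.len col) hinv'
      refine ⟨le_of_lt (lt_of_lt_of_le hc.1 hle), ?_⟩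
      cases hres : (tbfAltLoop e rest (some col) (PySem.Str.len col)).1 with
      | none => rw [hres] at hm; simp at hm
      | some b =>
        rw [hres] at hm
        obtain ⟨h1, h2, h3, h4⟩ := hm
        refine ⟨h1, ?_, h3, ?_⟩
        · rcases h2 with h | h
          · exact Or.inl (List.mem_cons_of_mem _ h)
          · exact Or.inl (by simp at h; subst h; exact List.mem_cons_self)
        · intro y hy hys
          rcases List.mem_cons.mp hy with h | h
          · subst h; exact hle
          · exact h4 y h hys
    · simp only [hc, if_neg, not_false_iff]
      obtain ⟨hle, hm⟩ := ih best bestLen hinv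
      refine ⟨hle, ?_⟩
      cases hres : (tbfAltLoop e rest best bestLen).1 with
      | none =>
        rw [hres] at hm
        obtain ⟨hb, hall⟩ := hm
        refine ⟨hb, ?_⟩
        intro y hy
        rcases List.mem_cons.mp hy with h | h
        · subst h
          rcases hinv with ⟨_, hl⟩ | ⟨b, hb', _, _⟩
          · subst hl
            by_contra hpy
            simp only [Bool.not_eq_false] at hpy
            have hpos : (0 : Int) ≤ PySem.Str.len y := by simp [PySem.Str.len_eq]
            exact hc ⟨by omega, hpy⟩
          · rw [hb] at hb'; simp at hb'
        · exact hall y h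
      | some b =>
        rw [hres] at hm
        obtain ⟨h1, h2, h3, h4⟩ := hm
        refine ⟨h1, ?_, h3, ?_⟩
        · rcases h2 with h | h
          · exact Or.inl (List.mem_cons_of_mem _ h)
          · exact Or.inr h
        · intro y hy hys
          rcases List.mem_cons.mp hy with h | h
          · subst h
            have : ¬ bestLen < PySem.Str.len y := fun hlt => hc ⟨hlt, hys⟩
            omega
          · exact h4 y h hys

-- ===== VERDICT (by name: the statement is the Claim_ definition above) =====
lemma tbf_cat_branch (e : String) (cols : List String) :
    (match (PySem.List.sorted cols PySem.Str.len true).find?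
        (fun col => PySem.Str.startswith e (col ++ "_")) with
     | some col => col
     | none => e) =
    (match (tbfAltLoop e cols none (-1)).1 with
     | some b => b
     | none => e) := by
  obtain ⟨hle, hm⟩ := tbfAltLoop_spec e cols none (-1) (Or.inl ⟨rfl, rfl⟩)
  cases hA : (PySem.List.sorted cols PySem.Str.len true).find?
      (fun col => PySem.Str.startswith e (col ++ "_")) with
  | none =>
    cases hB : (tbfAltLoop e cols none (-1)).1 with
    | none => rfl
    | some b =>
      rw [hB] at hm
      obtain ⟨hpb, hmem, _, _⟩ := hm
      rcases hmem with hmem | hmem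
      · have hbs : b ∈ PySem.List.sorted cols PySem.Str.len true :=
          (PySem.List.mem_sorted cols PySem.Str.len true b).mpr hmem
        have h := List.find?_eq_none.mp hA b hbs
        exact absurd hpb h
      · simp at hmem
  | some m =>
    obtain ⟨hpm, hmemm, hmaxm⟩ := tbf_find_max e _
      (PySem.List.sorted_pairwise_rev cols PySem.Str.len) hA
    have hmemm' : m ∈ cols := (PySem.List.mem_sorted cols PySem.Str.len true m).mp hmemm
    cases hB : (tbfAltLoop e cols none (-1)).1 with
    | none =>
      rw [hB] at hm
      have h := hm.2 m hmemm'
      rw [hpm] at h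
      exact absurd h (by simp)
    | some b =>
      rw [hB] at hm
      obtain ⟨hpb, hmemb, hlenb, hmaxb⟩ := hm
      rcases hmemb with hmemb | hmemb
      · have hbm : PySem.Str.len b ≤ PySem.Str.len m :=
          hmaxm b ((PySem.List.mem_sorted cols PySem.Str.len true b).mpr hmemb) hpb
        have hmb : PySem.Str.len m ≤ PySem.Str.len b := by
          rw [hlenb]; exact hmaxb m hmemm' hpm
        exact tbf_match_unique e m b hpm hpb (le_antisymm hmb hbm)
      · simp at hmemb

-- ===== VERDICT (by name: the statement is the Claim_ definition above) =====
theorem transformed_to_base_feature_spec : Claim_equal_transformed_to_base_feature := by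
  unfold Claim_equal_transformed_to_base_feature Spec_transformed_to_base_feature
  intro name cols _
  unfold transformed_to_base_feature transformed_to_base_feature_alt
  cases h1 : PySem.Str.startswith name "num__" with
  | true => rfl
  | false =>
    cases h2 : PySem.Str.startswith name "cat__" with
    | false => rfl
    | true =>
      simp only [reduceIte]
      exact tbf_cat_branch (PySem.Str.slice name (some 5) none) cols
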